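-- pv_equiv track=rewrite | github.com/mitsuhiko/worldtime-scheduler | worldtimesched.py | search_words_match
-- ===== SOURCE A (Python) =====
-- def search_words_match(search_words, reference_words):
--     lowest_match = len(reference_words) + 1
--     for search_word in search_words:
--         for idx, reference_word in enumerate(reference_words):
--             if reference_word.startswith(search_word):
--                 lowest_match = min(lowest_match, idx)
--                 break
--         else:
--             return -1
--     return lowest_match
-- ===== SOURCE B (Python) =====
-- def search_words_match(search_words, reference_words):
--     # Alternative strategy: a prefix index built once; every prefix of every reference word maps to the
--     # smallest index of a reference word having that prefix (iterate indices in
--     # reverse so earlier indices overwrite later ones). Each query is one lookup.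
--     first = {}
--     for idx in range(len(reference_words) - 1, -1, -1):
--         w = reference_words[idx]
--         for k in range(len(w) + 1):
--             first[w[:k]] = idx
--     lowest = len(reference_words) + 1
--     for sw in search_words:
--         if sw not in first:
--             return -1
--         lowest = min(lowest, first[sw])
--     return lowest
-- ===== Notes on version B (the rewrite author's own statement) =====
-- stated objective: alternative
-- what changed: Replaces A's per-search-word linear scan of reference_words with a prefix index (dict mapping every reference-word prefix to its minimal index) built once in reverse, so each search word becomes a single dict lookup; trades O(R*L^2) index construction for O(1) queries.
import Mathlib
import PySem

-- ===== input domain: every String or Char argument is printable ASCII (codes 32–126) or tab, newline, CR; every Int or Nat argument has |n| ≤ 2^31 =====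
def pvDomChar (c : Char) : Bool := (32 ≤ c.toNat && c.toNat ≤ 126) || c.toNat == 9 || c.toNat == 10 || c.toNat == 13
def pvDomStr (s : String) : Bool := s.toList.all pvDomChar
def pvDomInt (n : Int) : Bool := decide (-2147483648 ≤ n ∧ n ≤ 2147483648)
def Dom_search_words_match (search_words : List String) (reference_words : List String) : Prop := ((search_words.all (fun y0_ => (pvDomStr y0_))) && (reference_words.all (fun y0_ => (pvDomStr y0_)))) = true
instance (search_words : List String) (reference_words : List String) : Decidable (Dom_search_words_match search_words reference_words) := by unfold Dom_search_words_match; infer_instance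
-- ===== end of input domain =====

-- B replaces A's per-search-word scan of reference_words by a prefix→min-index
-- dictionary built once; each search word is then a single lookup (alternative algorithm).


-- ===== PORT A =====
-- A's inner 'for idx, reference_word in enumerate(reference_words): if startswith: break'
def swmFirst (search_word : String) : List (Int × String) → Option Int
  | [] => none
  | (idx, w) :: rest =>
    if PySem.Str.startswith w search_word then some idx else swmFirst search_word rest

-- A's outer 'for search_word in search_words' loop; the for/else returns -1
def swmLoop (reference_words : List String) : List String → Int → Int
  | [], lowest_match => lowest_match
  | search_word :: rest, lowest_match =>
    match swmFirst search_word (PySem.List.enumerate reference_words 0) with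
    | some idx => swmLoop reference_words rest (min lowest_match idx)
    | none => -1

def search_words_match (search_words : List String) (reference_words : List String) : Int :=
  swmLoop reference_words search_words ((reference_words.length : Int) + 1)

-- ===== PORT B =====
-- B's inner 'for k in range(len(w) + 1): first[w[:k]] = idx'
def altInsertPrefixes (d : PySem.Dict String Int) (w : String) (idx : Int) : PySem.Dict String Int :=
  (PySem.List.pyRange 0 ((w.toList.length : Int) + 1) 1).foldl
    (fun d' k => d'.insert (PySem.Str.slice w none (some k)) idx) d

-- B's 'for idx in range(len(reference_words) - 1, -1, -1)' build loop
-- (reference_words[idx] is always in range; pyGetD with an unused default is exact here)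
def altBuild (reference_words : List String) : PySem.Dict String Int :=
  (PySem.List.pyRange ((reference_words.length : Int) - 1) (-1) (-1)).foldl
    (fun d idx => altInsertPrefixes d (PySem.List.pyGetD reference_words idx "") idx)
    PySem.Dict.empty

-- B's query loop: 'if sw not in first: return -1; lowest = min(lowest, first[sw])'
def altQuery (d : PySem.Dict String Int) : List String → Int → Int
  | [], lowest => lowest
  | sw :: rest, lowest =>
    match d.get? sw with
    | none => -1
    | some i => altQuery d rest (min lowest i)

def search_words_match_alt (search_words : List String) (reference_words : List String) : Int :=
  altQuery (altBuild reference_words) search_words ((reference_words.length : Int) + 1)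

-- ===== PRECONDITION & SPEC =====
def Spec_search_words_match (search_words : List String) (reference_words : List String) (out : Int) : Prop := out = search_words_match_alt search_words reference_words
instance (search_words : List String) (reference_words : List String) (out : Int) : Decidable (Spec_search_words_match search_words reference_words out) := by unfold Spec_search_words_match; infer_instance

-- ===== CLAIM (what is proved, stated in full; the proofs are below) =====
def Claim_equal_search_words_match : Prop := ∀ (search_words : List String) (reference_words : List String), Dom_search_words_match search_words reference_words → Spec_search_words_match search_words reference_words (search_words_match search_words reference_words)

-- ===== LEMMAS AND PROOFS =====

-- inserting the same value idx under a list of keys: lookup hits iff some key equals p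
lemma get?_fold_insert (w : String) (idx : Int) :
    ∀ (ks : List Int) (d : PySem.Dict String Int) (p : String),
    ((ks.foldl (fun d' k => d'.insert (PySem.Str.slice w none (some k)) idx) d).get? p)
      = if ∃ k ∈ ks, PySem.Str.slice w none (some k) = p then some idx else d.get? p := by
  intro ks
  induction ks with
  | nil => simp
  | cons k rest ih =>
    intro d p
    simp only [List.foldl_cons, ih, PySem.Dict.get?_insert]
    by_cases h1 : ∃ k' ∈ rest, PySem.Str.slice w none (some k') = p
    · simp [h1]
    · by_cases h2 : p = PySem.Str.slice w none (some k)
      · simp [h2]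
      · have h3 : ¬ ∃ k' ∈ k :: rest, PySem.Str.slice w none (some k') = p := by
          simp only [List.mem_cons]
          rintro ⟨k', hk', he⟩
          rcases hk' with rfl | hk'
          · exact h2 he.symm
          · exact h1 ⟨k', hk', he⟩
        have h2' : ¬ PySem.Str.slice w none (some k) = p := fun he => h2 he.symm
        simp [h1, h2, h2']

-- p is one of w's slices w[:k], k ≤ len(w), iff w starts with p
lemma exists_slice_iff (w p : String) :
    (∃ k ∈ PySem.List.pyRange 0 ((w.toList.length : Int) + 1) 1,
        PySem.Str.slice w none (some k) = p)
      ↔ PySem.Str.startswith w p = true := by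
  simp only [PySem.List.mem_pyRange_one]
  rw [PySem.Str.startswith_eq, PySem.Chars.startswith_iff]
  constructor
  · rintro ⟨k, ⟨hk0, _⟩, rfl⟩
    simp only [PySem.Str.toList_slice, PySem.Chars.slice_eq_listSlice,
      PySem.List.slice_to _ hk0]
    exact List.take_prefix _ _
  · intro h
    refine ⟨(p.toList.length : Int), ⟨by positivity, ?_⟩, ?_⟩
    · have := h.length_le
      omega
    · rw [String.ext_iff]
      simp only [PySem.Str.toList_slice, PySem.Chars.slice_eq_listSlice,
        PySem.List.slice_to_natCast]
      exact (List.prefix_iff_eq_take.mp h).symm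

lemma get?_insertPrefixes (w : String) (idx : Int) (d : PySem.Dict String Int) (p : String) :
    (altInsertPrefixes d w idx).get? p
      = if PySem.Str.startswith w p then some idx else d.get? p := by
  unfold altInsertPrefixes
  rw [get?_fold_insert]
  by_cases h : PySem.Str.startswith w p = true
  · rw [if_pos ((exists_slice_iff w p).mpr h), if_pos h]
  · rw [if_neg (fun he => h ((exists_slice_iff w p).mp he)), if_neg h]

-- first index in idxs whose reference word starts with p (proof-side spec of both loops)
def firstPref (refs : List String) (p : String) : List Int → Option Int
  | [] => none
  | i :: rest =>
    if PySem.Str.startswith (PySem.List.pyGetD refs i "") p then some i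
    else firstPref refs p rest

lemma foldr_build (refs : List String) (p : String) :
    ∀ (idxs : List Int) (d0 : PySem.Dict String Int),
    ((idxs.foldr (fun idx d => altInsertPrefixes d (PySem.List.pyGetD refs idx "") idx) d0).get? p)
      = match firstPref refs p idxs with
        | some i => some i
        | none => d0.get? p := by
  intro idxs
  induction idxs with
  | nil => simp [firstPref]
  | cons i rest ih =>
    intro d0
    simp only [List.foldr_cons, get?_insertPrefixes, firstPref, ih]
    split <;> simp

lemma get?_build (refs : List String) (p : String) :
    (altBuild refs).get? p = firstPref refs p (PySem.List.pyRange 0 (refs.length : Int) 1) := by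
  unfold altBuild
  rw [PySem.List.pyRange_neg_one_eq_reverse]
  norm_num
  rw [foldr_build]
  cases firstPref refs p (PySem.List.pyRange 0 (refs.length : Int) 1) <;> simp

lemma swmFirst_map (refs : List String) (p : String) :
    ∀ idxs : List Int,
    swmFirst p (idxs.map (fun j => (j, PySem.List.pyGetD refs j "")))
      = firstPref refs p idxs := by
  intro idxs
  induction idxs with
  | nil => rfl
  | cons i rest ih => simp only [List.map_cons, swmFirst, firstPref, ih]

lemma swmFirst_eq_firstPref (refs : List String) (p : String) :
    swmFirst p (PySem.List.enumerate refs 0)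
      = firstPref refs p (PySem.List.pyRange 0 (refs.length : Int) 1) := by
  rw [PySem.List.enumerate_eq_map_pyRange (d := ""), swmFirst_map]
  norm_num [PySem.List.len_eq]

lemma loops_eq (refs : List String) (sws : List String) (lowest : Int) :
    swmLoop refs sws lowest = altQuery (altBuild refs) sws lowest := by
  induction sws generalizing lowest with
  | nil => rfl
  | cons sw rest ih =>
    simp only [swmLoop, altQuery, get?_build, swmFirst_eq_firstPref]
    cases firstPref refs sw (PySem.List.pyRange 0 (refs.length : Int) 1) with
    | none => rfl
    | some i => exact ih _

-- ===== VERDICT (by name: the statement is the Claim_ definition above) =====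
theorem search_words_match_spec : Claim_equal_search_words_match := by
  intro sws refs _
  unfold Spec_search_words_match search_words_match search_words_match_alt
  exact loops_eq refs sws _
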